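-- pv_equiv track=rewrite | github.com/VBReiter/python | lesson5/task_5_3.py | gen_group_tutor
-- ===== SOURCE A (Python) =====
-- def gen_group_tutor(tutors, groups):
--     for i in range(len(tutors)):
--         tut = tutors[i]
--         if i >= len(groups):
--             gr = None
--         else:
--             gr = groups[i]
--         yield tut, gr
-- ===== SOURCE B (Python) =====
-- def gen_group_tutor(tutors, groups):
--     # Structural recursion on the two sequences: emit the head pairing,
--     # then recurse on the tails (groups[1:] of an empty sequence is empty).
--     if not tutors:
--         return
--     yield tutors[0], (groups[0] if groups else None)
--     yield from gen_group_tutor(tutors[1:], groups[1:])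
-- ===== Notes on version B (the rewrite author's own statement) =====
-- stated objective: alternative
-- what changed: Replaces A's index loop with len comparison by structural recursion on the two sequences: yield the head pair (group head or None) and recurse on both tails, so no indices or length arithmetic appear.
import Mathlib
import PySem

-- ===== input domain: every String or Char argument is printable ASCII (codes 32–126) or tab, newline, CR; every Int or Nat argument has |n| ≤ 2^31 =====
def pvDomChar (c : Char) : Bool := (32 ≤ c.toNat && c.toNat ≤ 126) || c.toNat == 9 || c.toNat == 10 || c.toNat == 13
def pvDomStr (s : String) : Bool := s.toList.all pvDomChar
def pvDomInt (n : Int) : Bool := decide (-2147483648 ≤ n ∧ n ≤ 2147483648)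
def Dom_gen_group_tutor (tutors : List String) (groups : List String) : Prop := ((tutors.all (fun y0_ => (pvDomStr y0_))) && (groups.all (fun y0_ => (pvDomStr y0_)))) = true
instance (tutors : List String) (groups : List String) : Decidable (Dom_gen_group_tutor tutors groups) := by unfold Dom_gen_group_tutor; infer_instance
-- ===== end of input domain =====

-- B replaces A's index loop with structural recursion on both sequences (alternative decomposition, same return value).
-- ===== PORT A =====
-- Literal port of A: for i in range(len(tutors)): tut = tutors[i]; gr = None if i >= len(groups) else groups[i]; yield (tut, gr)
def gen_group_tutor (tutors : List String) (groups : List String) : List (String × Option String) :=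
  (PySem.List.pyRange 0 (tutors.length : Int) 1).map (fun i =>
    let tut := PySem.List.pyGetD tutors i ""
    let gr : Option String :=
      if (groups.length : Int) ≤ i then none
      else some (PySem.List.pyGetD groups i "")
    (tut, gr))

-- ===== PORT B =====
-- Port of B: if not tutors: return; yield (tutors[0], groups[0] if groups else None); recurse on tutors[1:], groups[1:].
-- groups[0] if groups else None = groups.head?; the slices xs[1:] are .tail (exact for lists).
def gen_group_tutor_alt (tutors : List String) (groups : List String) : List (String × Option String) :=
  match tutors with
  | [] => []
  | t :: ts => (t, groups.head?) :: gen_group_tutor_alt ts groups.tail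

-- ===== PRECONDITION & SPEC =====
def Spec_gen_group_tutor (tutors : List String) (groups : List String) (out : List (String × Option String)) : Prop := out = gen_group_tutor_alt tutors groups
instance (tutors : List String) (groups : List String) (out : List (String × Option String)) : Decidable (Spec_gen_group_tutor tutors groups out) := by unfold Spec_gen_group_tutor; infer_instance

-- ===== CLAIM (what is proved, stated in full; the proofs are below) =====
def Claim_equal_gen_group_tutor : Prop := ∀ (tutors : List String) (groups : List String), Dom_gen_group_tutor tutors groups → Spec_gen_group_tutor tutors groups (gen_group_tutor tutors groups)

-- ===== LEMMAS AND PROOFS =====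

-- Length and elementwise characterisation of B's recursion, used by the verdict proof.
theorem alt_length (tutors groups : List String) :
    (gen_group_tutor_alt tutors groups).length = tutors.length := by
  induction tutors generalizing groups with
  | nil => rfl
  | cons t ts ih => simp [gen_group_tutor_alt, ih]

theorem alt_getElem (tutors groups : List String) (k : Nat) (h : k < tutors.length)
    (h' : k < (gen_group_tutor_alt tutors groups).length) :
    (gen_group_tutor_alt tutors groups)[k] = (tutors[k], groups[k]?) := by
  induction tutors generalizing groups k with
  | nil => simp at h
  | cons t ts ih =>
    cases k with
    | zero => simp [gen_group_tutor_alt, List.head?_eq_getElem?]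
    | succ k =>
      have hk : k < ts.length := Nat.lt_of_succ_lt_succ h
      have hk' : k < (gen_group_tutor_alt ts groups.tail).length := by
        rw [alt_length]; exact hk
      simp only [gen_group_tutor_alt, List.getElem_cons_succ]
      rw [ih groups.tail k hk hk']
      simp [List.getElem?_tail]

-- ===== VERDICT (by name: the statement is the Claim_ definition above) =====
theorem gen_group_tutor_spec : Claim_equal_gen_group_tutor := by
  intro tutors groups _
  unfold Spec_gen_group_tutor gen_group_tutor
  apply List.ext_getElem
  · simp [PySem.List.length_pyRange_one, alt_length]
  · intro k h1 h2
    have hk : k < tutors.length := by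
      simpa [PySem.List.length_pyRange_one] using h1
    rw [alt_getElem tutors groups k hk h2]
    simp only [List.getElem_map, PySem.List.getElem_pyRange_one]
    have hidx : (0 : Int) + (k : Int) = (k : Int) := by ring
    rw [hidx, Prod.mk.injEq]
    constructor
    · simp [List.getD_eq_getElem?_getD, List.getElem?_eq_getElem hk]
    · by_cases hg : k < groups.length
      · have : ¬ ((groups.length : Int) ≤ (k : Int)) := by exact_mod_cast Nat.not_le.mpr hg
        rw [if_neg this]
        simp [List.getD_eq_getElem?_getD, List.getElem?_eq_getElem hg]
      · have : ((groups.length : Int) ≤ (k : Int)) := by exact_mod_cast Nat.le_of_not_lt hg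
        rw [if_pos this]
        simp [List.getElem?_eq_none (Nat.le_of_not_lt hg)]
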